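-- pv_equiv track=rewrite | github.com/halcyon-past/placement-training | 100 Leetcode POD/0196 TakeGiftsFromTheRichestPile.py | pickGifts
-- ===== SOURCE A (Python) =====
-- from typing import List
-- from heapq import heapify, heappop, heappush
-- from math import isqrt
--
-- def pickGifts(gifts: List[int], k: int) -> int:
--     gifts=[-x for x in gifts]
--     heapify(gifts)
--     x, i=1<<32, 0
--     while i<k and x>1:
--         x=-heappop(gifts)
--         heappush(gifts, -isqrt(x))
--         i+=1
--     return -sum(gifts)
-- ===== SOURCE B (Python) =====
-- from typing import List
-- from math import isqrt
--
-- def pickGifts(gifts: List[int], k: int) -> int: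
--     gifts = list(gifts)
--     for _ in range(k):
--         m = max(gifts)
--         if 0 <= m <= 1:
--             break  # sqrt is the identity on 0 and 1: no pile can shrink further
--         gifts[gifts.index(m)] = isqrt(m)  # raises ValueError when m < 0, as A does
--     return sum(gifts)
-- ===== Notes on version B (the rewrite author's own statement) =====
-- stated objective: simpler
-- what changed: Replaces A's negated max-heap (heapify/heappop/heappush on a negated copy) with a plain list, each of up to k rounds finding the maximum by a linear scan and replacing its first occurrence with isqrt in place, breaking early once the maximum is 0 or 1; like A it raises on k >= 1 with an empty list or an all-negative list, and those inputs are outside Pre_.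
import Mathlib
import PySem

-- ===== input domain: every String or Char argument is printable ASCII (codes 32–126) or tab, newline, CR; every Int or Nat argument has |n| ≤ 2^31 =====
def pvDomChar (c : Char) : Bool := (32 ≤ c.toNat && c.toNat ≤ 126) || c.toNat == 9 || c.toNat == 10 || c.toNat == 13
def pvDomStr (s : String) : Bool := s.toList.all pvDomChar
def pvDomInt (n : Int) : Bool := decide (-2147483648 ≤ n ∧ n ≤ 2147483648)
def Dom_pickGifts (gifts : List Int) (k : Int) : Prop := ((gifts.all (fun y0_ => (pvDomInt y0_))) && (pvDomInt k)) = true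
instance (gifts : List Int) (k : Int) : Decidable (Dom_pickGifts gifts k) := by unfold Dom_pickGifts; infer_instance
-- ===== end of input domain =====

-- B replaces A's heap with a plain list scanned for its maximum each round (objective: simpler,
-- no heap machinery); equal return values are proved on Pre_; neither port mutates its argument
-- (Python A mutates only its local copy).

-- ===== PORT A =====
-- heapq is modelled at its contract level: the heap is the list of its elements;
-- heappop removes (the first occurrence of) the minimum value, heappush adds the element.
-- Only the multiset matters to A's result, and popped values are equal either way.
-- math.isqrt = Int.sqrt, exact on nonnegative arguments; Python raises on negative ones
-- (those runs are excluded by Pre_pickGifts).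
def pickGiftsLoopA : Nat → List Int → Int → List Int
  | 0, h, _ => h
  | n+1, h, x =>
    if 1 < x then
      match h.min? with
      | none => h   -- heappop from an empty heap: IndexError, excluded by Pre_pickGifts
      | some m => pickGiftsLoopA n (-(Int.sqrt (-m)) :: h.erase m) (-m)
    else h

def pickGifts (gifts : List Int) (k : Int) : Int :=
  -(pickGiftsLoopA k.toNat (gifts.map (fun x => -x)) (2^32)).sum

-- ===== PORT B =====
-- gifts[gifts.index(m)] = isqrt(m): replace the first occurrence of m in place.
-- isqrt(m) raises ValueError when m < 0 (excluded by Pre_pickGifts, where the max is never negative).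
def replaceFirst : List Int → Int → Int → List Int
  | [], _, _ => []
  | x :: xs, v, w => if x = v then w :: xs else x :: replaceFirst xs v w

def pickGiftsLoopB : Nat → List Int → List Int
  | 0, g => g
  | n+1, g =>
    match g.max? with
    | none => g   -- max([]): ValueError, excluded by Pre_pickGifts
    | some m => if 0 ≤ m ∧ m ≤ 1 then g else pickGiftsLoopB n (replaceFirst g m (Int.sqrt m))

def pickGifts_alt (gifts : List Int) (k : Int) : Int :=
  (pickGiftsLoopB k.toNat gifts).sum

-- ===== PRECONDITION & SPEC =====
-- Pre_ excludes exactly the inputs on which Python A raises: k ≥ 1 with an empty list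
-- (IndexError from heappop) or with all elements negative (ValueError from isqrt);
-- B raises on exactly the same inputs (ValueError from max([]) or from isqrt).
def Pre_pickGifts (gifts : List Int) (k : Int) : Prop := k ≤ 0 ∨ ∃ x ∈ gifts, 0 ≤ x
instance (gifts : List Int) (k : Int) : Decidable (Pre_pickGifts gifts k) := by
  unfold Pre_pickGifts; infer_instance

def pvWitness_pickGifts : List Int × Int := ([25, 64, 9, 4, 100], 4)

def Spec_pickGifts (gifts : List Int) (k : Int) (out : Int) : Prop := out = pickGifts_alt gifts k
instance (gifts : List Int) (k : Int) (out : Int) : Decidable (Spec_pickGifts gifts k out) := by unfold Spec_pickGifts; infer_instance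

-- ===== CLAIM (what is proved, stated in full; the proofs are below) =====
def Claim_equal_pickGifts : Prop := ∀ (gifts : List Int) (k : Int), Dom_pickGifts gifts k → Pre_pickGifts gifts k → Spec_pickGifts gifts k (pickGifts gifts k)

-- ===== LEMMAS AND PROOFS =====

theorem sum_map_neg (l : List Int) : (l.map (fun x => -x)).sum = -l.sum := by
  induction l with
  | nil => simp
  | cons a t ih => simp [ih]; ring

theorem loopA_of_le (n : Nat) (h : List Int) (x : Int) (hx : ¬ 1 < x) :
    pickGiftsLoopA n h x = h := by
  cases n <;> simp [pickGiftsLoopA, hx]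

theorem min?_map_neg (g : List Int) (m : Int) (hg : g.max? = some m) :
    (g.map (fun x => -x)).min? = some (-m) := by
  rw [List.max?_eq_some_iff] at hg
  rw [List.min?_eq_some_iff]
  constructor
  · exact List.mem_map.mpr ⟨m, hg.1, rfl⟩
  · intro b hb
    rcases List.mem_map.mp hb with ⟨y, hy, rfl⟩
    exact neg_le_neg (hg.2 y hy)

theorem min?_perm {l₁ l₂ : List Int} (hp : l₁.Perm l₂) : l₁.min? = l₂.min? := by
  cases h₂ : l₂.min? with
  | none =>
    have : l₂ = [] := by
      cases l₂ with
      | nil => rfl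
      | cons a t => simp [List.min?_cons] at h₂
    subst this
    simp [List.perm_nil.mp hp]
  | some m =>
    rw [List.min?_eq_some_iff] at h₂ ⊢
    exact ⟨hp.mem_iff.mpr h₂.1, fun b hb => h₂.2 b (hp.mem_iff.mp hb)⟩

theorem replaceFirst_perm (l : List Int) (v w : Int) (hv : v ∈ l) :
    (replaceFirst l v w).Perm (w :: l.erase v) := by
  induction l with
  | nil => cases hv
  | cons a t ih =>
    by_cases hav : a = v
    · subst hav
      simp [replaceFirst, List.erase_cons_head]
    · have hvt : v ∈ t := by
        rcases List.mem_cons.mp hv with h | h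
        · exact absurd h.symm hav
        · exact h
      have herase : (a :: t).erase v = a :: t.erase v := by
        simp [hav]
      rw [herase]
      simp only [replaceFirst, if_neg hav]
      exact (List.Perm.cons a (ih hvt)).trans (List.Perm.swap w a (t.erase v))

theorem mem_replaceFirst (l : List Int) (v w : Int) (hv : v ∈ l) :
    w ∈ replaceFirst l v w := by
  induction l with
  | nil => cases hv
  | cons a t ih =>
    by_cases hav : a = v
    · simp [replaceFirst, hav]
    · have hvt : v ∈ t := by
        rcases List.mem_cons.mp hv with h | h
        · exact absurd h.symm hav
        · exact h
      simp only [replaceFirst, if_neg hav]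
      exact List.mem_cons_of_mem a (ih hvt)

theorem map_neg_replaceFirst (l : List Int) (v w : Int) :
    (replaceFirst l v w).map (fun x => -x)
      = replaceFirst (l.map (fun x => -x)) (-v) (-w) := by
  induction l with
  | nil => rfl
  | cons a t ih =>
    by_cases hav : a = v
    · simp [replaceFirst, hav]
    · have : ¬ (-a = -v) := fun h => hav (neg_injective h)
      simp [replaceFirst, hav, this, ih]

-- main invariant: A's heap sum is the negation of B's list sum
theorem loop_sum (n : Nat) : ∀ (g h : List Int) (x : Int),
    h.Perm (g.map (fun y => -y)) → (∃ y ∈ g, 0 ≤ y) → 1 < x →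
    (pickGiftsLoopA n h x).sum = -((pickGiftsLoopB n g).sum) := by
  induction n with
  | zero =>
    intro g h x hp _ _
    simp [pickGiftsLoopA, pickGiftsLoopB, hp.sum_eq, sum_map_neg]
  | succ n ih =>
    intro g h x hp hpos hx
    obtain ⟨y, hy, hy0⟩ := hpos
    -- g is nonempty, so it has a maximum m, and m ≥ y ≥ 0
    obtain ⟨m, hm⟩ : ∃ m, g.max? = some m := by
      cases hgm : g.max? with
      | none =>
        have : g = [] := by
          cases g with
          | nil => rfl
          | cons a t => simp [List.max?_cons] at hgm
        subst this; cases hy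
      | some m => exact ⟨m, rfl⟩
    have hmspec := List.max?_eq_some_iff.mp hm
    have hm0 : 0 ≤ m := le_trans hy0 (hmspec.2 y hy)
    have hmin : h.min? = some (-m) := (min?_perm hp).trans (min?_map_neg g m hm)
    have hmemh : -m ∈ h := (List.min?_eq_some_iff.mp hmin).1
    simp only [pickGiftsLoopA, if_pos hx, hmin]
    simp only [pickGiftsLoopB, hm]
    by_cases hm1 : m ≤ 1
    · -- max in [0,1]: B stops; A does one more no-op round (isqrt m = m there) then stops
      simp only [if_pos (And.intro hm0 hm1)]
      have hsq : Int.sqrt (-(-m)) = m := by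
        interval_cases m <;> decide
      have hnx : ¬ 1 < -(-m) := by omega
      rw [loopA_of_le n _ _ hnx, hsq]
      have hperm : (-m :: h.erase (-m)).Perm (g.map (fun y => -y)) :=
        (List.perm_cons_erase hmemh).symm.trans hp
      simp [hperm.sum_eq, sum_map_neg]
    · have : ¬ (0 ≤ m ∧ m ≤ 1) := fun h => hm1 h.2
      simp only [if_neg this]
      have hx' : 1 < -(-m) := by omega
      have hsq0 : 0 ≤ Int.sqrt m := Int.sqrt_nonneg m
      have hpos' : ∃ y ∈ replaceFirst g m (Int.sqrt m), 0 ≤ y :=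
        ⟨Int.sqrt m, mem_replaceFirst g m (Int.sqrt m) hmspec.1, hsq0⟩
      have hperm' : (-(Int.sqrt (-(-m))) :: h.erase (-m)).Perm
          ((replaceFirst g m (Int.sqrt m)).map (fun y => -y)) := by
        rw [neg_neg, map_neg_replaceFirst]
        refine List.Perm.trans ?_ (replaceFirst_perm (g.map (fun y => -y)) (-m)
          (-(Int.sqrt m)) (List.mem_map.mpr ⟨m, hmspec.1, rfl⟩)).symm
        exact List.Perm.cons _ (List.Perm.erase (-m) hp)
      exact ih _ _ _ hperm' hpos' hx'

-- ===== VERDICT (by name: the statement is the Claim_ definition above) =====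
theorem pickGifts_spec : Claim_equal_pickGifts := by
  intro gifts k _ hpre
  unfold Spec_pickGifts pickGifts pickGifts_alt
  cases hn : k.toNat with
  | zero => simp [pickGiftsLoopA, pickGiftsLoopB, sum_map_neg]
  | succ n =>
    have hk : ¬ k ≤ 0 := by
      intro hk0
      have := Int.toNat_of_nonpos hk0
      omega
    rcases hpre with h | h
    · exact absurd h hk
    · rw [loop_sum (n+1) gifts (gifts.map (fun x => -x)) (2^32) (List.Perm.refl _) h (by norm_num)]
      ring
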